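-- pv_equiv track=rewrite | github.com/Adam-Calleja/Polaris | src/polaris_rag/streamlit/views/assistant.py | latest_exchange
-- ===== SOURCE A (Python) =====
-- from typing import Any, Mapping
--
-- def latest_exchange(
--     messages: list[dict[str, Any]],
-- ) -> tuple[dict[str, Any] | None, dict[str, Any] | None, list[dict[str, Any]]]:
--     if not messages:
--         return None, None, []
--
--     latest_assistant_idx: int | None = None
--     for idx in range(len(messages) - 1, -1, -1):
--         if messages[idx].get("role") == "assistant":
--             latest_assistant_idx = idx
--             break
--
--     if latest_assistant_idx is None:
--         latest_user_idx = next(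
--             (idx for idx in range(len(messages) - 1, -1, -1) if messages[idx].get("role") == "user"),
--             None,
--         )
--         if latest_user_idx is None:
--             return None, None, list(messages)
--         return messages[latest_user_idx], None, messages[:latest_user_idx]
--
--     latest_user_idx: int | None = None
--     for idx in range(latest_assistant_idx - 1, -1, -1):
--         if messages[idx].get("role") == "user":
--             latest_user_idx = idx
--             break
--
--     latest_user = messages[latest_user_idx] if latest_user_idx is not None else None
--     older_messages = messages[: latest_user_idx if latest_user_idx is not None else latest_assistant_idx]
--     return latest_user, messages[latest_assistant_idx], older_messages
-- ===== SOURCE B (Python) =====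
-- def latest_exchange(messages):
--     last_user = None
--     assistant_idx = None
--     user_before = None
--     for i, msg in enumerate(messages):
--         role = msg.get("role")
--         if role == "user":
--             last_user = i
--         elif role == "assistant":
--             assistant_idx = i
--             user_before = last_user
--     if assistant_idx is not None:
--         if user_before is not None:
--             return messages[user_before], messages[assistant_idx], messages[:user_before]
--         return None, messages[assistant_idx], messages[:assistant_idx]
--     if last_user is not None:
--         return messages[last_user], None, messages[:last_user]
--     return None, None, list(messages)
-- ===== Notes on version B (the rewrite author's own statement) =====
-- stated objective: alternative
-- what changed: Replaced A's up-to-three backward scans with break (latest assistant, then latest user before it, or latest user overall) by one forward enumerate pass maintaining last_user, assistant_idx and the last user seen before the latest assistant, then assembling the result from those indices.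
import Mathlib
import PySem

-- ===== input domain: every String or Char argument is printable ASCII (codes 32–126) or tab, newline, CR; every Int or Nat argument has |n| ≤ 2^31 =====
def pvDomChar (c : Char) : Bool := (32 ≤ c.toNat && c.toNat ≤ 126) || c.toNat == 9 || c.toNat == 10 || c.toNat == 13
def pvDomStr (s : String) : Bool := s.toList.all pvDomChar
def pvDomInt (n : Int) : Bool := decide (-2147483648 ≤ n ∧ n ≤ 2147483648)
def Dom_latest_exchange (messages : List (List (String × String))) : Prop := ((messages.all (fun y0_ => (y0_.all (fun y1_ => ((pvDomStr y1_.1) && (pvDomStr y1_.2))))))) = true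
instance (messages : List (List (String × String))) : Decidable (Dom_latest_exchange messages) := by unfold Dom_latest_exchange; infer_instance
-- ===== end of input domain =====

-- B replaces A's up-to-three backward scans with break by one forward pass keeping
-- last_user / assistant_idx / user-before-latest-assistant; alternative decomposition, same cost.

-- ===== PORT A =====
-- m.get("role") : first match in the association list (Python dict has unique keys)
def pvRole (m : List (String × String)) : Option String :=
  (m.find? (fun p => p.1 == "role")).map (·.2)

-- 'for idx in range(k-1, -1, -1): if role == r: return idx / break' — checks k-1, k-2, …, 0;
-- indices are in-range Nats, so messages[idx] is ported as getD (exact here)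
def pvScanDown (messages : List (List (String × String))) (r : String) : Nat → Option Nat
  | 0 => none
  | k + 1 => if pvRole (messages.getD k []) == some r then some k else pvScanDown messages r k

def latest_exchange (messages : List (List (String × String))) : (Option (List (String × String))) × (Option (List (String × String))) × (List (List (String × String))) :=
  if messages = [] then (none, none, [])
  else
    match pvScanDown messages "assistant" messages.length with
    | none =>
      match pvScanDown messages "user" messages.length with
      | none => (none, none, messages)
      -- messages[:u] with u : Nat is take u (exact: nonnegative in-range stop)
      | some u => (some (messages.getD u []), none, messages.take u)
    | some a =>
      match pvScanDown messages "user" a with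
      | none => (none, some (messages.getD a []), messages.take a)
      | some u => (some (messages.getD u []), some (messages.getD a []), messages.take u)

-- ===== PORT B =====
-- state = (next enumerate index, last_user, assistant_idx, user_before); one forward pass
def pvFwd (msgs : List (List (String × String))) (st : Nat × Option Nat × Option Nat × Option Nat) :
    Nat × Option Nat × Option Nat × Option Nat :=
  match msgs, st with
  | [], st => st
  | m :: t, (i, lU, aI, uB) =>
    if pvRole m == some "user" then pvFwd t (i + 1, some i, aI, uB)
    else if pvRole m == some "assistant" then pvFwd t (i + 1, lU, some i, lU)
    else pvFwd t (i + 1, lU, aI, uB)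

def latest_exchange_alt (messages : List (List (String × String))) : (Option (List (String × String))) × (Option (List (String × String))) × (List (List (String × String))) :=
  match pvFwd messages (0, none, none, none) with
  | (_, _, some a, some u) => (some (messages.getD u []), some (messages.getD a []), messages.take u)
  | (_, _, some a, none) => (none, some (messages.getD a []), messages.take a)
  | (_, some u, none, _) => (some (messages.getD u []), none, messages.take u)
  | (_, none, none, _) => (none, none, messages)

-- ===== PRECONDITION & SPEC =====
def Spec_latest_exchange (messages : List (List (String × String))) (out : (Option (List (String × String))) × (Option (List (String × String))) × (List (List (String × String)))) : Prop := out = latest_exchange_alt messages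
instance (messages : List (List (String × String))) (out : (Option (List (String × String))) × (Option (List (String × String))) × (List (List (String × String)))) : Decidable (Spec_latest_exchange messages out) := by unfold Spec_latest_exchange; infer_instance

-- ===== CLAIM (what is proved, stated in full; the proofs are below) =====
def Claim_equal_latest_exchange : Prop := ∀ (messages : List (List (String × String))), Dom_latest_exchange messages → Spec_latest_exchange messages (latest_exchange messages)

-- ===== LEMMAS AND PROOFS =====

-- one step of the forward pass, as a function of the state
def pvStep (st : Nat × Option Nat × Option Nat × Option Nat) (m : List (String × String)) :
    Nat × Option Nat × Option Nat × Option Nat :=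
  match st with
  | (i, lU, aI, uB) =>
    if pvRole m == some "user" then (i + 1, some i, aI, uB)
    else if pvRole m == some "assistant" then (i + 1, lU, some i, lU)
    else (i + 1, lU, aI, uB)

theorem pvScanDown_lt (ms : List (List (String × String))) (r : String) (k j : Nat)
    (h : pvScanDown ms r k = some j) : j < k := by
  induction k with
  | zero => simp [pvScanDown] at h
  | succ k ih =>
    simp only [pvScanDown] at h
    split at h
    · cases h; omega
    · exact Nat.lt_succ_of_lt (ih h)

-- scanning a prefix does not see the appended element
theorem pvScanDown_append (ms : List (List (String × String))) (m : List (String × String))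
    (r : String) (k : Nat) (hk : k ≤ ms.length) :
    pvScanDown (ms ++ [m]) r k = pvScanDown ms r k := by
  induction k with
  | zero => rfl
  | succ k ih =>
    have hklt : k < ms.length := hk
    simp [pvScanDown, List.getD, List.getElem?_append_left hklt, ih (Nat.le_of_lt hklt)]

theorem pvScanDown_snoc (ms : List (List (String × String))) (m : List (String × String))
    (r : String) :
    pvScanDown (ms ++ [m]) r (ms.length + 1) =
      if pvRole m == some r then some ms.length else pvScanDown ms r ms.length := by
  have hget : (ms ++ [m]).getD ms.length [] = m := by
    simp [List.getD]
  simp only [pvScanDown, hget]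
  split <;> simp [pvScanDown_append ms m r ms.length (le_refl _)]

theorem pvFwd_snoc (xs : List (List (String × String))) (m : List (String × String))
    (st : Nat × Option Nat × Option Nat × Option Nat) :
    pvFwd (xs ++ [m]) st = pvStep (pvFwd xs st) m := by
  induction xs generalizing st with
  | nil =>
    obtain ⟨i, lU, aI, uB⟩ := st
    simp [pvFwd, pvStep]
  | cons x t ih =>
    obtain ⟨i, lU, aI, uB⟩ := st
    simp only [List.cons_append, pvFwd]
    split <;> [skip; split] <;> exact ih _

-- the forward-pass state after the whole list, characterised by the backward scans
theorem pvFwd_char (ms : List (List (String × String))) :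
    pvFwd ms (0, none, none, none) =
      (ms.length, pvScanDown ms "user" ms.length, pvScanDown ms "assistant" ms.length,
        match pvScanDown ms "assistant" ms.length with
        | some a => pvScanDown ms "user" a
        | none => none) := by
  induction ms using List.reverseRecOn with
  | nil => rfl
  | append_singleton ms m ih =>
    rw [pvFwd_snoc, ih]
    simp only [pvStep, List.length_append, List.length_singleton,
      pvScanDown_snoc]
    by_cases hu : pvRole m == some "user"
    · have ha : (pvRole m == some "assistant") = false := by
        cases hpr : pvRole m <;> simp_all
      simp only [hu, ha, if_true, Bool.false_eq_true, if_false]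
      cases hA : pvScanDown ms "assistant" ms.length with
      | none => simp
      | some a =>
        have := pvScanDown_lt ms "assistant" ms.length a hA
        simp [pvScanDown_append ms m "user" a (Nat.le_of_lt this)]
    · simp only [hu, Bool.false_eq_true, if_false]
      by_cases ha : pvRole m == some "assistant"
      · simp only [ha, if_true]
        simp [pvScanDown_append ms m "user" ms.length (le_refl _)]
      · simp only [ha, Bool.false_eq_true, if_false]
        cases hA : pvScanDown ms "assistant" ms.length with
        | none => simp
        | some a =>
          have := pvScanDown_lt ms "assistant" ms.length a hA
          simp [pvScanDown_append ms m "user" a (Nat.le_of_lt this)]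

theorem latest_exchange_spec : Claim_equal_latest_exchange := by
  intro messages _
  unfold Spec_latest_exchange latest_exchange latest_exchange_alt
  rw [pvFwd_char]
  by_cases hnil : messages = []
  · subst hnil; rfl
  · simp only [hnil, if_false]
    cases hA : pvScanDown messages "assistant" messages.length with
    | none =>
      cases hU : pvScanDown messages "user" messages.length with
      | none => rfl
      | some u => rfl
    | some a =>
      cases hU : pvScanDown messages "user" a with
      | none => simp only [hU]
      | some u => simp only [hU]
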